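-- pv_equiv track=rewrite | github.com/hlachaizeDS/Normalization_Pump_OT2 | excelRead.py | splitSequences
-- ===== SOURCE A (Python) =====
-- def splitSequences(sequences,cycle):
--
--     ended_wells = []
--     A_wells=[]
--     C_wells=[]
--     G_wells=[]
--     U_wells=[]
--     M_wells=[]
--     N_wells=[]
--
--     nucleos=['A','C','G','U','M','N']
--     nucleo_arrays=[ended_wells,A_wells,C_wells,G_wells,U_wells,M_wells,N_wells]
--
--     for nucleo in range(1,6+1):
--         for sample in range(len(sequences)):
--             if (cycle<=len(sequences[sample][1]) and sequences[sample][1][cycle-1]==nucleos[nucleo-1]):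
--                 nucleo_arrays[nucleo].append(sequences[sample][0])
--
--     for sample in range(len(sequences)):
--         if cycle > len(sequences[sample][1]):
--             ended_wells.append(sequences[sample][0])
--
--     return nucleo_arrays
-- ===== SOURCE B (Python) =====
-- def splitSequences(sequences, cycle):
--     buckets = {c: [] for c in 'ACGUMN'}
--     ended = []
--     for name, seq in sequences:
--         if cycle > len(seq):
--             ended.append(name)
--         else:
--             ch = seq[cycle - 1]
--             if ch in buckets:
--                 buckets[ch].append(name)
--     return [ended] + [buckets[c] for c in 'ACGUMN']
-- ===== Notes on version B (the rewrite author's own statement) =====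
-- stated objective: simpler
-- what changed: A makes seven separate scans over the samples (one per nucleotide constant, then one for ended wells); B makes a single pass, dispatching each sample either to the ended list or through a char-keyed dict of buckets.
import Mathlib
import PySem

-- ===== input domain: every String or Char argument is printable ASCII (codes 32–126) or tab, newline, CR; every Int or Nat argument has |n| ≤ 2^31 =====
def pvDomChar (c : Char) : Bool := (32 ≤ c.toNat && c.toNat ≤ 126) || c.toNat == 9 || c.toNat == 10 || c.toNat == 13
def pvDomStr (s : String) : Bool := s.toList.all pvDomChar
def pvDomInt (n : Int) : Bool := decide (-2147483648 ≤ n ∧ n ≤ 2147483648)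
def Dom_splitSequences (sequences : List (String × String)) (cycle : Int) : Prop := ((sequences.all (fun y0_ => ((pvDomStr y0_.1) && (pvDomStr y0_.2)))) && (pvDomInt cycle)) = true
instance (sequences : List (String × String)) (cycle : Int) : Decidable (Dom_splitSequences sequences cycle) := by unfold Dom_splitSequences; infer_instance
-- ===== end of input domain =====

-- B replaces A's seven scans of the input (one per nucleotide, plus one for ended wells) by a
-- single pass dispatching each sample into a dict of buckets; same return value (simpler, one pass).

-- ===== PORT A =====
def pvNucleos : List Char := ['A', 'C', 'G', 'U', 'M', 'N']

-- inner 'for sample in range(len(sequences))' loop of A's nucleo loop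
def pvInnerA (sequences : List (String × String)) (cycle : Int) (nucleo : Int)
    (arrays : List (List String)) : List (List String) :=
  (PySem.List.pyRange 0 (sequences.length : Int) 1).foldl
    (fun arr sample =>
      let p := PySem.List.pyGetD sequences sample ("", "")
      if cycle ≤ PySem.Str.len p.2 ∧
          PySem.Str.pyGet? p.2 (cycle - 1) = PySem.List.pyGet? pvNucleos (nucleo - 1)
      then PySem.List.pySetD arr nucleo (PySem.List.pyGetD arr nucleo [] ++ [p.1])
      else arr)
    arrays

-- the final 'for sample in range(len(sequences))' loop of A (appends to ended_wells)
def pvEndedA (sequences : List (String × String)) (cycle : Int) (e : List String) : List String :=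
  (PySem.List.pyRange 0 (sequences.length : Int) 1).foldl
    (fun e sample =>
      let p := PySem.List.pyGetD sequences sample ("", "")
      if PySem.Str.len p.2 < cycle then e ++ [p.1] else e)
    e

def splitSequences (sequences : List (String × String)) (cycle : Int) : List (List String) :=
  let nucleo_arrays : List (List String) := [[], [], [], [], [], [], []]
  let arrays :=
    (PySem.List.pyRange 1 (6 + 1) 1).foldl
      (fun arr nucleo => pvInnerA sequences cycle nucleo arr) nucleo_arrays
  let ended := pvEndedA sequences cycle (PySem.List.pyGetD arrays 0 [])
  PySem.List.pySetD arrays 0 ended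

-- ===== PORT B =====
-- one step of B's single pass: ended wells or dict dispatch
def pvStepB (cycle : Int) (st : List String × PySem.Dict Char (List String))
    (p : String × String) : List String × PySem.Dict Char (List String) :=
  if PySem.Str.len p.2 < cycle then (st.1 ++ [p.1], st.2)
  else
    match PySem.Str.pyGet? p.2 (cycle - 1) with
    | some ch => if st.2.contains ch then (st.1, st.2.modify ch [] (· ++ [p.1])) else st
    | none => st

def splitSequences_alt (sequences : List (String × String)) (cycle : Int) : List (List String) :=
  let buckets0 : PySem.Dict Char (List String) :=
    PySem.Dict.ofList [('A', []), ('C', []), ('G', []), ('U', []), ('M', []), ('N', [])]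
  let st := sequences.foldl (pvStepB cycle) ([], buckets0)
  [st.1] ++ pvNucleos.map (fun c => st.2.getD c [])

-- ===== PRECONDITION & SPEC =====
-- Pre_ excludes exactly the inputs where Python A raises IndexError: a sample whose
-- sequence is not longer than cycle-1's negative reach (index cycle-1 out of range while cycle <= len).
def Pre_splitSequences (sequences : List (String × String)) (cycle : Int) : Prop :=
  ∀ p ∈ sequences, cycle ≤ PySem.Str.len p.2 →
    PySem.Raise.InRange p.2.toList.length (cycle - 1)
instance (sequences : List (String × String)) (cycle : Int) : Decidable (Pre_splitSequences sequences cycle) := by unfold Pre_splitSequences; infer_instance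

def pvWitness_splitSequences : (List (String × String)) × Int :=
  ([("A1", "ACGU"), ("B1", "GA"), ("C1", "")], 2)

def Spec_splitSequences (sequences : List (String × String)) (cycle : Int) (out : List (List String)) : Prop := out = splitSequences_alt sequences cycle
instance (sequences : List (String × String)) (cycle : Int) (out : List (List String)) : Decidable (Spec_splitSequences sequences cycle out) := by unfold Spec_splitSequences; infer_instance

-- ===== CLAIM (what is proved, stated in full; the proofs are below) =====
def Claim_equal_splitSequences : Prop := ∀ (sequences : List (String × String)) (cycle : Int), Dom_splitSequences sequences cycle → Pre_splitSequences sequences cycle → Spec_splitSequences sequences cycle (splitSequences sequences cycle)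

-- ===== LEMMAS AND PROOFS =====

-- canonical bucket of one nucleotide, and the canonical ended list
def pvBucket (sequences : List (String × String)) (cycle : Int) (c : Char) : List String :=
  (sequences.filter (fun p =>
    decide (cycle ≤ PySem.Str.len p.2 ∧ PySem.Str.pyGet? p.2 (cycle - 1) = some c))).map (·.1)

def pvEnded (sequences : List (String × String)) (cycle : Int) : List String :=
  (sequences.filter (fun p => decide (PySem.Str.len p.2 < cycle))).map (·.1)

theorem pvBucket_cons_pos {x : String × String} {xs : List (String × String)} {cycle : Int}
    {c : Char} (h : cycle ≤ PySem.Str.len x.2 ∧ PySem.Str.pyGet? x.2 (cycle - 1) = some c) :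
    pvBucket (x :: xs) cycle c = x.1 :: pvBucket xs cycle c := by
  unfold pvBucket
  rw [List.filter_cons, if_pos (by simpa using h)]
  rfl

theorem pvBucket_cons_neg {x : String × String} {xs : List (String × String)} {cycle : Int}
    {c : Char} (h : ¬ (cycle ≤ PySem.Str.len x.2 ∧ PySem.Str.pyGet? x.2 (cycle - 1) = some c)) :
    pvBucket (x :: xs) cycle c = pvBucket xs cycle c := by
  unfold pvBucket
  rw [List.filter_cons, if_neg (by simpa using h)]

theorem pvEnded_cons_pos {x : String × String} {xs : List (String × String)} {cycle : Int}
    (h : PySem.Str.len x.2 < cycle) :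
    pvEnded (x :: xs) cycle = x.1 :: pvEnded xs cycle := by
  unfold pvEnded
  rw [List.filter_cons, if_pos (by simpa using h)]
  rfl

theorem pvEnded_cons_neg {x : String × String} {xs : List (String × String)} {cycle : Int}
    (h : ¬ PySem.Str.len x.2 < cycle) :
    pvEnded (x :: xs) cycle = pvEnded xs cycle := by
  unfold pvEnded
  rw [List.filter_cons, if_neg (by simpa using h)]

-- a fold that conditionally appends to slot n of a fixed-shape list of lists
theorem pv_foldl_set {α : Type} (l : List α) (f : α → Prop) [DecidablePred f]
    (g : α → String) (n : Nat) (arrays : List (List String)) (hn : n < arrays.length) :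
    l.foldl (fun arr p => if f p then arr.set n (arr.getD n [] ++ [g p]) else arr) arrays
      = arrays.set n (arrays.getD n [] ++ (l.filter (fun p => decide (f p))).map g) := by
  induction l generalizing arrays with
  | nil =>
    simp only [List.foldl_nil, List.filter_nil, List.map_nil, List.append_nil, List.getD]
    rw [List.getElem?_eq_getElem hn]
    simp [List.set_getElem_self]
  | cons x xs ih =>
    by_cases hx : f x
    · simp only [List.foldl_cons, if_pos hx, List.filter_cons, decide_eq_true hx]
      rw [ih _ (by simpa using hn)]
      simp only [List.getD, List.getElem?_set_self hn, Option.getD_some, List.set_set]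
      rw [List.append_assoc]
      rfl
    · simp only [List.foldl_cons, if_neg hx, List.filter_cons]
      rw [ih _ hn]
      simp [hx]

-- A's inner loop, in set/filter form (nucleo is one of the literal indices 1..6)
theorem pvInnerA_eq (sequences : List (String × String)) (cycle : Int) (n : Nat)
    (c : Char) (hc : PySem.List.pyGet? pvNucleos ((n : Int) - 1) = some c)
    (arrays : List (List String)) (hn : n < arrays.length) :
    pvInnerA sequences cycle (n : Int) arrays
      = arrays.set n (arrays.getD n [] ++ pvBucket sequences cycle c) := by
  unfold pvInnerA
  rw [PySem.List.foldl_pyRange_zero_pyGetD' sequences ("", "")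
      (fun arr p =>
        if cycle ≤ PySem.Str.len p.2 ∧
            PySem.Str.pyGet? p.2 (cycle - 1) = PySem.List.pyGet? pvNucleos ((n : Int) - 1)
        then PySem.List.pySetD arr (n : Int) (PySem.List.pyGetD arr (n : Int) [] ++ [p.1])
        else arr) arrays]
  rw [hc]
  have : ∀ (arr : List (List String)) (p : String × String),
      (if cycle ≤ PySem.Str.len p.2 ∧ PySem.Str.pyGet? p.2 (cycle - 1) = some c
       then PySem.List.pySetD arr (n : Int) (PySem.List.pyGetD arr (n : Int) [] ++ [p.1])
       else arr)
      = (if (cycle ≤ PySem.Str.len p.2 ∧ PySem.Str.pyGet? p.2 (cycle - 1) = some c)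
         then arr.set n (arr.getD n [] ++ [p.1]) else arr) := by
    intro arr p
    simp [PySem.List.pySetD_natCast, PySem.List.pyGetD_natCast]
  simp only [this]
  exact pv_foldl_set sequences _ (·.1) n arrays hn

-- B's pass: first component collects the ended wells
theorem pvStepB_fst (cycle : Int) (sequences : List (String × String))
    (e : List String) (d : PySem.Dict Char (List String)) :
    (sequences.foldl (pvStepB cycle) (e, d)).1 = e ++ pvEnded sequences cycle := by
  induction sequences generalizing e d with
  | nil => simp [pvEnded]
  | cons x xs ih =>
    rw [List.foldl_cons]
    by_cases hx : PySem.Str.len x.2 < cycle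
    · have hstep : pvStepB cycle (e, d) x = (e ++ [x.1], d) := by
        unfold pvStepB
        rw [if_pos hx]
      rw [hstep, ih, pvEnded_cons_pos hx]
      simp
    · cases hg : PySem.Str.pyGet? x.2 (cycle - 1) with
      | none =>
        have hstep : pvStepB cycle (e, d) x = (e, d) := by
          unfold pvStepB
          rw [if_neg hx, hg]
        rw [hstep, ih, pvEnded_cons_neg hx]
      | some ch =>
        by_cases hcc : d.contains ch
        · have hstep : pvStepB cycle (e, d) x = (e, d.modify ch [] (· ++ [x.1])) := by
            unfold pvStepB
            rw [if_neg hx, hg]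
            simp [hcc]
          rw [hstep, ih, pvEnded_cons_neg hx]
        · have hstep : pvStepB cycle (e, d) x = (e, d) := by
            unfold pvStepB
            rw [if_neg hx, hg]
            simp [hcc]
          rw [hstep, ih, pvEnded_cons_neg hx]

-- B's pass: the dict collects each nucleotide's bucket
theorem pvStepB_snd (cycle : Int) (sequences : List (String × String))
    (e : List String) (d : PySem.Dict Char (List String))
    (hk : d.keys = pvNucleos) (c : Char) (hcmem : c ∈ pvNucleos) :
    ((sequences.foldl (pvStepB cycle) (e, d)).2).getD c []
      = d.getD c [] ++ pvBucket sequences cycle c := by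
  induction sequences generalizing e d with
  | nil => simp [pvBucket]
  | cons x xs ih =>
    rw [List.foldl_cons]
    by_cases hx : PySem.Str.len x.2 < cycle
    · have hstep : pvStepB cycle (e, d) x = (e ++ [x.1], d) := by
        unfold pvStepB
        rw [if_pos hx]
      rw [hstep, ih _ d hk, pvBucket_cons_neg (by intro h; omega)]
    · cases hg : PySem.Str.pyGet? x.2 (cycle - 1) with
      | none =>
        have hstep : pvStepB cycle (e, d) x = (e, d) := by
          unfold pvStepB
          rw [if_neg hx, hg]
        rw [hstep, ih _ d hk,
          pvBucket_cons_neg (by intro h; rw [hg] at h; exact absurd h.2 (by simp))]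
      | some ch =>
        by_cases hcc : d.contains ch
        · have hstep : pvStepB cycle (e, d) x = (e, d.modify ch [] (· ++ [x.1])) := by
            unfold pvStepB
            rw [if_neg hx, hg]
            simp [hcc]
          have hkeys : (d.modify ch [] (· ++ [x.1])).keys = pvNucleos := by
            rw [PySem.Dict.keys_modify, PySem.Dict.keys_insert_of_contains _ _ hcc]
            exact hk
          rw [hstep, ih _ _ hkeys]
          by_cases hch : ch = c
          · subst hch
            rw [PySem.Dict.getD_modify_self,
              pvBucket_cons_pos ⟨by omega, hg⟩]
            simp
          · rw [PySem.Dict.getD_modify_of_ne _ _ _ (fun h => hch h.symm),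
              pvBucket_cons_neg (by
                intro h; rw [hg] at h; exact hch (Option.some.inj h.2))]

        · have hstep : pvStepB cycle (e, d) x = (e, d) := by
            unfold pvStepB
            rw [if_neg hx, hg]
            simp [hcc]
          have hch : ch ≠ c := by
            intro h; subst h
            exact hcc ((PySem.Dict.contains_iff_mem_keys d ch).mpr (by rw [hk]; exact hcmem))
          rw [hstep, ih _ d hk,
            pvBucket_cons_neg (by
              intro h; rw [hg] at h; exact hch (Option.some.inj h.2))]

-- the ended loop of A, in filter form
theorem pvEndedA_eq (sequences : List (String × String)) (cycle : Int) (e : List String) :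
    pvEndedA sequences cycle e = e ++ pvEnded sequences cycle := by
  unfold pvEndedA
  rw [PySem.List.foldl_pyRange_zero_pyGetD' sequences ("", "")
      (fun e p => if PySem.Str.len p.2 < cycle then e ++ [p.1] else e) e]
  rw [PySem.List.foldl_append_ite (fun p : String × String => PySem.Str.len p.2 < cycle) (·.1)]
  rfl

-- ===== VERDICT (by name: the statement is the Claim_ definition above) =====
theorem splitSequences_spec : Claim_equal_splitSequences := by
  intro sequences cycle _ _
  unfold Spec_splitSequences splitSequences splitSequences_alt
  -- A side: unroll the six nucleotide passes
  have hrange : PySem.List.pyRange 1 (6 + 1) 1 = [1, 2, 3, 4, 5, 6] := by decide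
  rw [hrange]
  simp only [List.foldl_cons, List.foldl_nil]
  rw [show (1 : Int) = ((1 : Nat) : Int) by norm_num,
    pvInnerA_eq sequences cycle 1 'A' (by decide) _ (by norm_num)]
  rw [show (2 : Int) = ((2 : Nat) : Int) by norm_num,
    pvInnerA_eq sequences cycle 2 'C' (by decide) _ (by simp)]
  rw [show (3 : Int) = ((3 : Nat) : Int) by norm_num,
    pvInnerA_eq sequences cycle 3 'G' (by decide) _ (by simp)]
  rw [show (4 : Int) = ((4 : Nat) : Int) by norm_num,
    pvInnerA_eq sequences cycle 4 'U' (by decide) _ (by simp)]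
  rw [show (5 : Int) = ((5 : Nat) : Int) by norm_num,
    pvInnerA_eq sequences cycle 5 'M' (by decide) _ (by simp)]
  rw [show (6 : Int) = ((6 : Nat) : Int) by norm_num,
    pvInnerA_eq sequences cycle 6 'N' (by decide) _ (by simp)]
  simp only [List.set, List.getD, List.getElem?_cons_zero, List.getElem?_cons_succ,
    Option.getD_some]
  rw [pvEndedA_eq]
  -- B side: the single pass
  rw [pvStepB_fst]
  have hb : ∀ c, c ∈ pvNucleos →
      ((sequences.foldl (pvStepB cycle)
        ([], PySem.Dict.ofList [('A', []), ('C', []), ('G', []), ('U', []), ('M', []), ('N', [])])).2).getD c []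
        = pvBucket sequences cycle c := by
    intro c hc
    rw [pvStepB_snd cycle sequences []
      (PySem.Dict.ofList [('A', []), ('C', []), ('G', []), ('U', []), ('M', []), ('N', [])])
      (by decide) c hc]
    have : (PySem.Dict.ofList [('A', []), ('C', []), ('G', []), ('U', []), ('M', []), ('N', [])] :
        PySem.Dict Char (List String)).getD c [] = [] := by
      fin_cases hc <;> rfl
    rw [this]
    rfl
  simp only [pvNucleos, List.map_cons, List.map_nil]
  rw [hb 'A' (by decide), hb 'C' (by decide), hb 'G' (by decide),
    hb 'U' (by decide), hb 'M' (by decide), hb 'N' (by decide)]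
  simp [PySem.List.pySetD_of_nonneg]
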